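-- pv_equiv track=rewrite | github.com/cppalliance/wg21-paperlint | tomd/lib/mailing_merge.py | rollup_meta_source
-- ===== SOURCE A (Python) =====
-- FRONT_MATTER_KEYS = (
--     "title",
--     "document",
--     "date",
--     "intent",
--     "audience",
--     "reply-to",
-- )
--
-- def rollup_meta_source(provenance: dict[str, str]) -> str:
--     """``mailing`` | ``tomd`` | ``merged`` for keys in ``FRONT_MATTER_KEYS`` only."""
--     labels = [provenance.get(k) for k in FRONT_MATTER_KEYS if k in provenance]
--     if not labels:
--         return "tomd"
--     if all(x == "mailing" for x in labels):
--         return "mailing"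
--     if all(x == "tomd" for x in labels):
--         return "tomd"
--     return "merged"
-- ===== SOURCE B (Python) =====
-- FRONT_MATTER_KEYS = (
--     "title",
--     "document",
--     "date",
--     "intent",
--     "audience",
--     "reply-to",
-- )
--
-- def rollup_meta_source(provenance: dict[str, str]) -> str:
--     """``mailing`` | ``tomd`` | ``merged`` for keys in ``FRONT_MATTER_KEYS`` only."""
--     # One pass over the dict's items, joining labels in the lattice
--     # mailing / tomd / merged (merged = top); None = no front-matter key seen.
--     state = None
--     for key, value in provenance.items():
--         if key not in FRONT_MATTER_KEYS:
--             continue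
--         label = value if value in ("mailing", "tomd") else "merged"
--         if state is None:
--             state = label
--         elif state != label:
--             state = "merged"
--     return "tomd" if state is None else state
-- ===== Notes on version B (the rewrite author's own statement) =====
-- stated objective: alternative
-- what changed: B makes a single pass over the dict's items with a three-valued lattice accumulator (mailing/tomd joined to merged on conflict), instead of A's staged build of a label list over the key tuple followed by two separate all() scans.
import Mathlib
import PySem

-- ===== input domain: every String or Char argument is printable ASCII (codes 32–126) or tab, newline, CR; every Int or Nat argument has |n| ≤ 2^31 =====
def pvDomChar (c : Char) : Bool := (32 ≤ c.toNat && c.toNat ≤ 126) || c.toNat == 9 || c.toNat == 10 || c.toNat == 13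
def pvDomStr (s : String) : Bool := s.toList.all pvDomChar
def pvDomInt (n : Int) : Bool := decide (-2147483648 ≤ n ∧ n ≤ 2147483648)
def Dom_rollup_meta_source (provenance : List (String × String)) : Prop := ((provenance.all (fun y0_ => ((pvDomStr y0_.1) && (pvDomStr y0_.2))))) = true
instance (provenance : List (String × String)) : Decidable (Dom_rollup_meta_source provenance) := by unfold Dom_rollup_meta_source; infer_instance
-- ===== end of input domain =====

-- B replaces A's staged label list + two all() scans with a single pass over the
-- dict's items joining labels in a three-valued lattice; same cost, one traversal.


-- module constant FRONT_MATTER_KEYS (shared by both ports)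
def pvFrontMatterKeys : List String :=
  ["title", "document", "date", "intent", "audience", "reply-to"]

-- ===== PORT A =====
def rollup_meta_source (provenance : List (String × String)) : String :=
  let d := PySem.Dict.ofList provenance
  -- labels = [provenance.get(k) for k in FRONT_MATTER_KEYS if k in provenance]
  let labels : List (Option String) :=
    (pvFrontMatterKeys.filter (fun k => d.contains k)).map (fun k => d.get? k)
  if labels.isEmpty then "tomd"
  else if labels.all (fun x => x == some "mailing") then "mailing"
  else if labels.all (fun x => x == some "tomd") then "tomd"
  else "merged"

-- ===== PORT B =====
-- B's loop body: join the next value's label into the accumulator state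
def pvStep (st : Option String) (v : String) : Option String :=
  let label := if v == "mailing" || v == "tomd" then v else "merged"
  match st with
  | none => some label
  | some s => if s ≠ label then some "merged" else some s

def rollup_meta_source_alt (provenance : List (String × String)) : String :=
  let d := PySem.Dict.ofList provenance
  -- for key, value in provenance.items(): if key not in FRONT_MATTER_KEYS: continue; …
  let st := d.items.foldl
    (fun st p => if pvFrontMatterKeys.contains p.1 then pvStep st p.2 else st) none
  match st with
  | none => "tomd"
  | some s => s

-- ===== PRECONDITION & SPEC =====
def Spec_rollup_meta_source (provenance : List (String × String)) (out : String) : Prop := out = rollup_meta_source_alt provenance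
instance (provenance : List (String × String)) (out : String) : Decidable (Spec_rollup_meta_source provenance out) := by unfold Spec_rollup_meta_source; infer_instance

-- ===== CLAIM (what is proved, stated in full; the proofs are below) =====
def Claim_equal_rollup_meta_source : Prop := ∀ (provenance : List (String × String)), Dom_rollup_meta_source provenance → Spec_rollup_meta_source provenance (rollup_meta_source provenance)

-- ===== LEMMAS AND PROOFS =====

-- the label-value lists the two ports effectively range over
def pvAvs (d : PySem.Dict String String) : List String :=
  (pvFrontMatterKeys.filter (fun k => d.contains k)).map (fun k => d.getD k "")
def pvBvs (d : PySem.Dict String String) : List String :=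
  (d.items.filter (fun p => pvFrontMatterKeys.contains p.1)).map (fun p => p.2)

-- canonical classification of a label-value list
def pvClassify (vs : List String) : Option String :=
  if vs.isEmpty then none
  else if vs.all (fun x => x == "mailing") then some "mailing"
  else if vs.all (fun x => x == "tomd") then some "tomd"
  else some "merged"

-- under the contains-filter, get? returns exactly 'some (getD k "")'
theorem pv_labels_map_some (d : PySem.Dict String String) :
    (pvFrontMatterKeys.filter (fun k => d.contains k)).map (fun k => d.get? k)
      = (pvAvs d).map some := by
  unfold pvAvs
  rw [List.map_map]
  refine List.map_congr_left (fun k hk => ?_)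
  have hc : d.contains k = true := (List.mem_filter.mp hk).2
  have hs : (d.get? k).isSome := by rw [← PySem.Dict.contains_eq_isSome_get?]; exact hc
  cases h : d.get? k with
  | none => rw [h] at hs; simp at hs
  | some v => simp [PySem.Dict.getD_eq_get?_getD, h]

-- a guarded foldl is a foldl over the filtered, projected list
theorem pv_foldl_guard (l : List (String × String)) (s : Option String) :
    l.foldl (fun st p => if pvFrontMatterKeys.contains p.1 then pvStep st p.2 else st) s
      = ((l.filter (fun p => pvFrontMatterKeys.contains p.1)).map (fun p => p.2)).foldl pvStep s := by
  induction l generalizing s with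
  | nil => rfl
  | cons x xs ih =>
    rw [List.foldl_cons, List.filter_cons]
    by_cases h : pvFrontMatterKeys.contains x.1 = true
    · rw [if_pos h, if_pos h, List.map_cons, List.foldl_cons, ih]
    · rw [if_neg h, if_neg h, ih]

-- the fold computes the canonical classification
theorem pv_step_classify (vs : List String) (v : String) :
    pvStep (pvClassify vs) v = pvClassify (vs ++ [v]) := by
  unfold pvClassify pvStep
  by_cases hnil : vs = []
  · subst hnil
    by_cases hm : v = "mailing"
    · simp [hm]
    · by_cases ht : v = "tomd" <;> simp [hm, ht]
  · have h1 : vs.isEmpty = false := by simp [hnil]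
    have h2 : (vs ++ [v]).isEmpty = false := by simp
    have hcontra : ¬((vs.all fun x => x == "mailing") = true ∧ (vs.all fun x => x == "tomd") = true) := by
      rintro ⟨ha, hb⟩
      obtain ⟨y, ys, rfl⟩ := List.exists_cons_of_ne_nil hnil
      have hy1 : y = "mailing" := by simpa using List.all_eq_true.mp ha y (by simp)
      have hy2 : y = "tomd" := by simpa using List.all_eq_true.mp hb y (by simp)
      rw [hy1] at hy2; exact absurd hy2 (by decide)
    simp only [h1, h2, Bool.false_eq_true, if_false, List.all_append, List.all_cons,
      List.all_nil, Bool.and_true]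
    rcases Bool.eq_false_or_eq_true (vs.all fun x => x == "mailing") with ha | ha
    · have hb : (vs.all fun x => x == "tomd") = false := by
        rcases Bool.eq_false_or_eq_true (vs.all fun x => x == "tomd") with hb | hb
        · exact absurd ⟨ha, hb⟩ hcontra
        · exact hb
      by_cases hvm : v = "mailing" <;> by_cases hvt : v = "tomd"
      all_goals try (rw [hvm] at hvt; exact absurd hvt (by decide))
      all_goals simp [ha, hb, hvm, hvt]
    · rcases Bool.eq_false_or_eq_true (vs.all fun x => x == "tomd") with hb | hb <;>
      by_cases hvm : v = "mailing" <;> by_cases hvt : v = "tomd"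
      all_goals try (rw [hvm] at hvt; exact absurd hvt (by decide))
      all_goals simp [ha, hb, hvm, hvt]

theorem pv_foldl_classify (vs : List String) :
    vs.foldl pvStep none = pvClassify vs := by
  induction vs using List.reverseRecOn with
  | nil => rfl
  | append_singleton xs x ih => rw [List.foldl_append, List.foldl_cons, List.foldl_nil, ih, pv_step_classify]

-- membership in the two label-value lists coincides (keys of a dict are unique)
theorem pv_mem_iff (d : PySem.Dict String String) (hn : d.keys.Nodup) (v : String) :
    v ∈ pvAvs d ↔ v ∈ pvBvs d := by
  unfold pvAvs pvBvs
  simp only [List.mem_map, List.mem_filter]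
  constructor
  · rintro ⟨k, ⟨hkK, hc⟩, rfl⟩
    have hs : (d.get? k).isSome := by rw [← PySem.Dict.contains_eq_isSome_get?]; exact hc
    obtain ⟨w, hw⟩ := Option.isSome_iff_exists.mp hs
    have hmem : (k, w) ∈ d.items := PySem.Dict.mem_items_of_get?_eq_some d hw
    refine ⟨(k, w), ⟨hmem, by simpa using hkK⟩, ?_⟩
    simp [PySem.Dict.getD_eq_get?_getD, hw]
  · rintro ⟨⟨k, w⟩, ⟨hmem, hkK⟩, rfl⟩
    have hw : d.get? k = some w := PySem.Dict.get?_of_mem_items d hmem hn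
    refine ⟨k, ⟨by simpa using hkK, ?_⟩, ?_⟩
    · rw [PySem.Dict.contains_eq_isSome_get?, hw]; rfl
    · simp [PySem.Dict.getD_eq_get?_getD, hw]

theorem pv_all_congr {l₁ l₂ : List String} (h : ∀ x, x ∈ l₁ ↔ x ∈ l₂) (p : String → Bool) :
    l₁.all p = l₂.all p := by
  cases hb : l₂.all p with
  | true => simp only [List.all_eq_true] at hb ⊢; exact fun x hx => hb x ((h x).mp hx)
  | false =>
    rw [Bool.eq_false_iff] at hb ⊢
    intro hc; apply hb
    simp only [List.all_eq_true] at hc ⊢; exact fun x hx => hc x ((h x).mpr hx)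

theorem pv_classify_congr (d : PySem.Dict String String) (hn : d.keys.Nodup) :
    pvClassify (pvAvs d) = pvClassify (pvBvs d) := by
  have hmem := pv_mem_iff d hn
  have hemp : (pvAvs d).isEmpty = (pvBvs d).isEmpty := by
    cases hb : (pvBvs d).isEmpty with
    | true =>
      rw [List.isEmpty_iff] at hb ⊢
      rw [List.eq_nil_iff_forall_not_mem]
      intro x hx; rw [hb] at hmem; exact absurd ((hmem x).mp hx) (by simp)
    | false =>
      rw [Bool.eq_false_iff, Ne, List.isEmpty_iff] at hb ⊢
      intro hc
      obtain ⟨y, hy⟩ := List.exists_mem_of_ne_nil _ hb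
      rw [hc] at hmem
      exact absurd ((hmem y).mpr hy) (by simp)
  unfold pvClassify
  rw [hemp, pv_all_congr hmem, pv_all_congr hmem]

-- ===== VERDICT (by name: the statement is the Claim_ definition above) =====
theorem rollup_meta_source_spec : Claim_equal_rollup_meta_source := by
  intro provenance _
  simp only [Spec_rollup_meta_source, rollup_meta_source, rollup_meta_source_alt]
  rw [pv_labels_map_some (PySem.Dict.ofList provenance)]
  rw [pv_foldl_guard]
  rw [show ((PySem.Dict.ofList provenance).items.filter
        (fun p => pvFrontMatterKeys.contains p.1)).map (fun p => p.2)
      = pvBvs (PySem.Dict.ofList provenance) from rfl]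
  rw [pv_foldl_classify, ← pv_classify_congr _ (PySem.Dict.nodup_keys_ofList provenance)]
  set vs := pvAvs (PySem.Dict.ofList provenance) with hvs
  have hemp : (vs.map some).isEmpty = vs.isEmpty := by cases vs <;> simp
  have hall : ∀ c : String, ((vs.map some).all (fun x => x == some c)) = vs.all (fun x => x == c) := by
    intro c; simp only [List.all_map, Function.comp_def]; rfl
  rw [hemp, hall, hall]
  unfold pvClassify
  by_cases h0 : vs.isEmpty = true
  · simp [h0]
  · by_cases h1 : (vs.all fun x => x == "mailing") = true
    · simp [h0, h1]
    · by_cases h2 : (vs.all fun x => x == "tomd") = true <;> simp [h0, h1, h2]
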